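-- pv_equiv track=rewrite | github.com/zmockwebdesign/collatz-v2 | collatz_analysis.py | find_downstep_sequences
-- ===== SOURCE A (Python) =====
-- def find_downstep_sequences(sequence):
--     """
--     Find positions where there are at least 2 consecutive downsteps (divisions by 2).
--
--     A downstep occurs when we go from an even number to its half.
--     Returns list of (start_index, length) for each downstep sequence of length >= 2.
--     """
--     downstep_sequences = []
--     i = 0
--
--     while i < len(sequence) - 1:
--         # Check if this is the start of a downstep sequence
--         if sequence[i] % 2 == 0:
--             start = i
--             length = 0
--
--             # Count consecutive even numbers (each represents a /2 step)
--             j = i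
--             while j < len(sequence) - 1 and sequence[j] % 2 == 0:
--                 length += 1
--                 j += 1
--
--             if length >= 2:
--                 downstep_sequences.append((start, length))
--
--             i = j
--         else:
--             i += 1
--
--     return downstep_sequences
-- ===== SOURCE B (Python) =====
-- def find_downstep_sequences(sequence):
--     """Single-pass run-tracking state machine over sequence[:-1] (the slice
--     expresses A's rule that the final element is never counted)."""
--     out = []
--     start = 0
--     cur_even = None
--     n = 0
--     for i, x in enumerate(sequence[:-1]):
--         even = x % 2 == 0
--         if even == cur_even:
--             n += 1
--         else:
--             if cur_even and n >= 2:
--                 out.append((start, n))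
--             start, cur_even, n = i, even, 1
--     if cur_even and n >= 2:
--         out.append((start, n))
--     return out
-- ===== Notes on version B (the rewrite author's own statement) =====
-- stated objective: faster
-- what changed: Replaces the index-based nested while loops (manual i/j advancing, repeated len() tests and sequence[j] indexing) by a single enumerate pass over sequence[:-1] that tracks the current parity run (start, parity, count) as a state machine and flushes a run when the parity changes or at the end.
import Mathlib
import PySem

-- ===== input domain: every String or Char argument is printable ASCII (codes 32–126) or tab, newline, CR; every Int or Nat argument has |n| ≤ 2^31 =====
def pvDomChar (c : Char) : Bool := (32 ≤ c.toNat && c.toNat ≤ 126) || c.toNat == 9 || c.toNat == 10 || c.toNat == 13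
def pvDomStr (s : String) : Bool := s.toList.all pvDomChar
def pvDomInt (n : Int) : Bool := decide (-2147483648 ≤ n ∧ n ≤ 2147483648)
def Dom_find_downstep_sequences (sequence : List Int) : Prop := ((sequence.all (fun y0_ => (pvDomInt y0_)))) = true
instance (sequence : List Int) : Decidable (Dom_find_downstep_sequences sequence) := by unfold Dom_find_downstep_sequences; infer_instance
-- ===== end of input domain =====

-- B replaces A's index-based nested while loops by a single-pass parity-run state machine
-- over sequence[:-1]; equivalence of the return values is proved for all inputs (both are total).

-- ===== PORT A =====
-- inner while loop: `while j < len(sequence) - 1 and sequence[j] % 2 == 0: length += 1; j += 1`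
-- (indices are always in range when read, so `getD _ 0` is exact for `sequence[j]`;
--  the fuel argument only makes the recursion structural: `seq.length` fuel always suffices,
--  since each iteration increments j and the loop guard needs j < seq.length - 1)
def pvInner (seq : List Int) : Nat → Nat → Nat → Nat × Nat
  | 0, j, len => (len, j)
  | fuel + 1, j, len =>
    if j < seq.length - 1 ∧ PySem.Int.mod (seq.getD j 0) 2 = 0 then
      pvInner seq fuel (j + 1) (len + 1)
    else (len, j)

-- outer while loop of A (fuel likewise: i advances by at least 1 per iteration)
def pvOuter (seq : List Int) : Nat → Nat → List (Int × Int) → List (Int × Int)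
  | 0, _, acc => acc
  | fuel + 1, i, acc =>
    if i < seq.length - 1 then
      if PySem.Int.mod (seq.getD i 0) 2 = 0 then
        pvOuter seq fuel (pvInner seq seq.length i 0).2
          (if 2 ≤ (pvInner seq seq.length i 0).1 then
             acc ++ [((i : Int), ((pvInner seq seq.length i 0).1 : Int))] else acc)
      else pvOuter seq fuel (i + 1) acc
    else acc

def find_downstep_sequences (sequence : List Int) : List (Int × Int) :=
  pvOuter sequence sequence.length 0 []

-- ===== PORT B =====
-- one step of B's loop body: state is (out, start, cur_even, n)
def pvStepB (st : List (Int × Int) × Int × Option Bool × Int) (p : Int × Int) :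
    List (Int × Int) × Int × Option Bool × Int :=
  let even : Bool := PySem.Int.mod p.2 2 == 0
  if some even = st.2.2.1 then (st.1, st.2.1, st.2.2.1, st.2.2.2 + 1)
  else
    ((if st.2.2.1 = some true ∧ 2 ≤ st.2.2.2 then st.1 ++ [(st.2.1, st.2.2.2)] else st.1),
     p.1, some even, 1)

def find_downstep_sequences_alt (sequence : List Int) : List (Int × Int) :=
  let st := (PySem.List.enumerate sequence.dropLast 0).foldl pvStepB ([], 0, none, 0)
  -- final flush: `if cur_even and n >= 2`
  if st.2.2.1 = some true ∧ 2 ≤ st.2.2.2 then st.1 ++ [(st.2.1, st.2.2.2)] else st.1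

-- ===== PRECONDITION & SPEC =====
def Spec_find_downstep_sequences (sequence : List Int) (out : List (Int × Int)) : Prop := out = find_downstep_sequences_alt sequence
instance (sequence : List Int) (out : List (Int × Int)) : Decidable (Spec_find_downstep_sequences sequence out) := by unfold Spec_find_downstep_sequences; infer_instance

-- ===== CLAIM (what is proved, stated in full; the proofs are below) =====
def Claim_equal_find_downstep_sequences : Prop := ∀ (sequence : List Int), Dom_find_downstep_sequences sequence → Spec_find_downstep_sequences sequence (find_downstep_sequences sequence)

-- ===== LEMMAS AND PROOFS =====

-- length of the leading run of elements whose evenness equals b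
def leadLen (b : Bool) : List Int → Nat
  | [] => 0
  | x :: xs => if (PySem.Int.mod x 2 == 0) = b then leadLen b xs + 1 else 0

-- canonical run recursion both ports are reduced to
def goR : List Int → Int → List (Int × Int)
  | [], _ => []
  | x :: xs, idx =>
    let b : Bool := PySem.Int.mod x 2 == 0
    let k := leadLen b xs
    let rest := goR (xs.drop k) (idx + 1 + (k : Int))
    if b = true ∧ 2 ≤ k + 1 then (idx, ((k : Int) + 1)) :: rest else rest
termination_by xs => xs.length
decreasing_by simp

theorem pvInner_eq (seq : List Int) (fuel j len : Nat) (hf : seq.length - 1 - j ≤ fuel) :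
    pvInner seq fuel j len =
      (len + leadLen true (seq.dropLast.drop j), j + leadLen true (seq.dropLast.drop j)) := by
  induction fuel generalizing j len with
  | zero =>
    have hnil : seq.dropLast.drop j = [] := List.drop_eq_nil_of_le (by simp; omega)
    simp [pvInner, hnil, leadLen]
  | succ fuel ih =>
    rcases Nat.lt_or_ge j (seq.length - 1) with h1 | h1
    · have hj : j < seq.dropLast.length := by simp; omega
      have hd : seq.dropLast.drop j = seq.dropLast[j] :: seq.dropLast.drop (j+1) :=
        List.drop_eq_getElem_cons hj
      have hg : seq.dropLast[j] = seq.getD j 0 := by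
        rw [List.getElem_dropLast, List.getD_eq_getElem seq 0 (by omega)]
      by_cases h2 : PySem.Int.mod (seq.getD j 0) 2 = 0
      · have h2' := h2
        rw [PySem.Int.mod_eq_zero_iff_dvd] at h2'
        simp only [List.getD] at h2'
        rw [show pvInner seq (fuel+1) j len = pvInner seq fuel (j+1) (len+1) from by
              simp only [pvInner]; rw [if_pos ⟨h1, h2⟩]]
        rw [ih (j+1) (len+1) (by omega), hd]
        simp [leadLen, hg, List.getD, h2']
        omega
      · rw [show pvInner seq (fuel+1) j len = (len, j) from by
              simp only [pvInner]; rw [if_neg (fun hc => h2 hc.2)]]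
        rw [hd]
        rw [PySem.Int.mod_eq_zero_iff_dvd] at h2
        simp only [List.getD] at h2
        simp [leadLen, hg, List.getD, h2]
    · have hnil : seq.dropLast.drop j = [] := List.drop_eq_nil_of_le (by simp; omega)
      rw [show pvInner seq (fuel+1) j len = (len, j) from by
            simp only [pvInner]; rw [if_neg (fun hc => absurd hc.1 (by omega))]]
      simp [hnil, leadLen]

theorem goR_odd (x : Int) (xs : List Int) (idx : Int) (h : ¬ PySem.Int.mod x 2 = 0) :
    goR (x :: xs) idx = goR xs (idx + 1) := by
  have hb : (PySem.Int.mod x 2 == 0) = false := by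
    simpa using h
  rw [goR]
  simp only [hb]
  rw [if_neg (by simp)]
  match xs with
  | [] => simp only [leadLen]; norm_num [goR]
  | y :: ys =>
    rcases Bool.eq_false_or_eq_true (PySem.Int.mod y 2 == 0) with hy | hy
    · have hk : leadLen false (y :: ys) = 0 := by
        simp only [leadLen, hy]; norm_num
      rw [hk]
      norm_num
    · have hk : leadLen false (y :: ys) = leadLen false ys + 1 := by
        simp only [leadLen, hy]; norm_num
      rw [hk]
      conv_rhs => rw [goR]
      simp only [hy]
      rw [if_neg (by simp), List.drop_succ_cons]
      push_cast
      congr 1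
      ring

theorem pvOuter_eq (seq : List Int) (fuel i : Nat) (acc : List (Int × Int))
    (hf : seq.length - 1 - i ≤ fuel) :
    pvOuter seq fuel i acc = acc ++ goR (seq.dropLast.drop i) (i : Int) := by
  induction fuel generalizing i acc with
  | zero =>
    have hnil : seq.dropLast.drop i = [] := List.drop_eq_nil_of_le (by simp; omega)
    simp [pvOuter, hnil, goR]
  | succ fuel ih =>
    rcases Nat.lt_or_ge i (seq.length - 1) with h | h
    · have hj : i < seq.dropLast.length := by simp; omega
      have hd : seq.dropLast.drop i = seq.dropLast[i] :: seq.dropLast.drop (i+1) :=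
        List.drop_eq_getElem_cons hj
      have hg : seq.dropLast[i] = seq.getD i 0 := by
        rw [List.getElem_dropLast, List.getD_eq_getElem seq 0 (by omega)]
      by_cases h2 : PySem.Int.mod (seq.getD i 0) 2 = 0
      · have hbeq : (PySem.Int.mod (seq.dropLast[i]) 2 == 0) = true := by
          rw [hg]; exact beq_iff_eq.mpr h2
        have hlead : leadLen true (seq.dropLast.drop i)
            = leadLen true (seq.dropLast.drop (i+1)) + 1 := by
          rw [hd]; simp only [leadLen, hbeq]; norm_num
        set k := leadLen true (seq.dropLast.drop (i+1)) with hk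
        have hinner : pvInner seq seq.length i 0 = (k + 1, i + (k + 1)) := by
          rw [pvInner_eq seq seq.length i 0 (by omega), hlead]; simp
        rw [show pvOuter seq (fuel+1) i acc
              = pvOuter seq fuel (pvInner seq seq.length i 0).2
                  (if 2 ≤ (pvInner seq seq.length i 0).1 then
                     acc ++ [((i : Int), ((pvInner seq seq.length i 0).1 : Int))] else acc) from by
              simp only [pvOuter]; rw [if_pos h, if_pos h2]]
        rw [hinner]
        simp only
        rw [ih (i + (k + 1)) _ (by omega)]
        conv_rhs => rw [hd, goR]
        simp only [hbeq, ← hk]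
        have hdd : (seq.dropLast.drop (i+1)).drop k = seq.dropLast.drop (i + (k+1)) := by
          rw [List.drop_drop]; congr 1; omega
        have hidx : ((i + (k+1) : Nat) : Int) = (i : Int) + 1 + (k : Int) := by push_cast; ring
        rw [hdd, hidx]
        split_ifs with c1 c2 c2
        · push_cast
          simp [List.append_assoc]
        · exact absurd ⟨trivial, c1⟩ c2
        · exact absurd c2.2 c1
        · simp
      · rw [show pvOuter seq (fuel+1) i acc = pvOuter seq fuel (i+1) acc from by
              simp only [pvOuter]; rw [if_pos h, if_neg h2]]
        rw [ih (i+1) acc (by omega), hd, goR_odd _ _ _ (by rw [hg]; exact h2)]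
        push_cast
        rfl
    · have hnil : seq.dropLast.drop i = [] := List.drop_eq_nil_of_le (by simp; omega)
      rw [show pvOuter seq (fuel+1) i acc = acc from by
            simp only [pvOuter]; rw [if_neg (by omega)]]
      simp [hnil, goR]

def flushB (st : List (Int × Int) × Int × Option Bool × Int) : List (Int × Int) :=
  if st.2.2.1 = some true ∧ 2 ≤ st.2.2.2 then st.1 ++ [(st.2.1, st.2.2.2)] else st.1

theorem ite_append_singleton {c : Prop} [Decidable c] (o : List (Int × Int)) (a : Int × Int) :
    (if c then o ++ [a] else o) = o ++ (if c then [a] else []) := by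
  split_ifs <;> simp

theorem ite_cons {c : Prop} [Decidable c] (a : Int × Int) (r : List (Int × Int)) :
    (if c then a :: r else r) = (if c then [a] else []) ++ r := by
  split_ifs <;> simp

theorem foldB_eq (xs : List Int) (b : Bool) (o : List (Int × Int)) (s idx n : Int)
    (hn : 1 ≤ n) :
    flushB ((PySem.List.enumerate xs idx).foldl pvStepB (o, s, some b, n)) =
      o ++ (if b = true ∧ 2 ≤ n + (leadLen b xs : Int) then [(s, n + (leadLen b xs : Int))] else [])
        ++ goR (xs.drop (leadLen b xs)) (idx + (leadLen b xs : Int)) := by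
  induction xs generalizing b o s idx n with
  | nil =>
    simp only [PySem.List.enumerate_nil, List.foldl_nil, leadLen, flushB]
    simp [goR]
    split_ifs <;> simp_all
  | cons x xs ih =>
    rw [PySem.List.enumerate_cons, List.foldl_cons]
    rcases Bool.eq_false_or_eq_true ((PySem.Int.mod x 2 == 0) == b) with he | he
    · -- same parity: extend the current run
      have heq : some (PySem.Int.mod x 2 == 0) = some b := by
        simp at he ⊢; exact he
      have hstep : pvStepB (o, s, some b, n) (idx, x) = (o, s, some b, n + 1) := by
        simp only [pvStepB, if_pos heq]
      have hlead : leadLen b (x :: xs) = leadLen b xs + 1 := by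
        simp only [leadLen]; rw [if_pos (by simpa using he)]
      rw [hstep, ih _ _ _ _ _ (by omega), hlead, List.drop_succ_cons]
      push_cast
      rw [show n + 1 + (leadLen b xs : Int) = n + ((leadLen b xs : Int) + 1) from by ring,
          show idx + 1 + (leadLen b xs : Int) = idx + ((leadLen b xs : Int) + 1) from by ring]
    · -- parity differs from the current run: flush and start a new run at index idx
      have hne : ¬ some (PySem.Int.mod x 2 == 0) = some b := by
        simp at he ⊢; exact he
      have hstep : pvStepB (o, s, some b, n) (idx, x) =
          ((if some b = some true ∧ 2 ≤ n then o ++ [(s, n)] else o),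
           idx, some (PySem.Int.mod x 2 == 0), 1) := by
        simp only [pvStepB, if_neg hne]
      have hlead : leadLen b (x :: xs) = 0 := by
        simp only [leadLen]; rw [if_neg (by simpa using he)]
      rw [hstep, ih _ _ _ _ _ (by omega), hlead]
      simp only [Nat.cast_zero, List.drop_zero, add_zero]
      conv_rhs => rw [goR]
      rw [ite_append_singleton, ite_cons]
      push_cast
      rw [show (1 : Int) + (leadLen (PySem.Int.mod x 2 == 0) xs : Int)
            = (leadLen (PySem.Int.mod x 2 == 0) xs : Int) + 1 from by ring]
      simp [List.append_assoc]
      split_ifs <;> first | rfl | (exfalso; omega)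
theorem main_eq (seq : List Int) : find_downstep_sequences seq = find_downstep_sequences_alt seq := by
  have hA : find_downstep_sequences seq = goR seq.dropLast 0 := by
    unfold find_downstep_sequences
    rw [pvOuter_eq seq seq.length 0 [] (by omega)]
    simp
  rw [hA]
  unfold find_downstep_sequences_alt
  match hb : seq.dropLast with
  | [] =>
    simp [PySem.List.enumerate_nil, goR]
  | x :: xs =>
    rw [PySem.List.enumerate_cons, List.foldl_cons]
    have hstep : pvStepB ([], 0, none, 0) (0, x) = ([], 0, some (PySem.Int.mod x 2 == 0), 1) := by
      simp [pvStepB]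
    rw [hstep]
    have hfold := foldB_eq xs (PySem.Int.mod x 2 == 0) [] 0 (0 + 1) 1 (by norm_num)
    rw [show (List.foldl pvStepB ([], 0, some (PySem.Int.mod x 2 == 0), 1)
          (PySem.List.enumerate xs (0 + 1))) =
        ((PySem.List.enumerate xs (0 + 1)).foldl pvStepB ([], (0 : Int), some (PySem.Int.mod x 2 == 0), (1 : Int))) from rfl]
    rw [show (0 : Int) + 1 = 1 from by norm_num] at hfold ⊢
    rw [show (if (((PySem.List.enumerate xs 1).foldl pvStepB ([], (0 : Int), some (PySem.Int.mod x 2 == 0), (1 : Int))) : List (Int × Int) × Int × Option Bool × Int).2.2.1 = some true ∧ 2 ≤ (((PySem.List.enumerate xs 1).foldl pvStepB ([], (0 : Int), some (PySem.Int.mod x 2 == 0), (1 : Int))).2.2.2)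
          then ((PySem.List.enumerate xs 1).foldl pvStepB ([], (0 : Int), some (PySem.Int.mod x 2 == 0), (1 : Int))).1 ++ [(((PySem.List.enumerate xs 1).foldl pvStepB ([], (0 : Int), some (PySem.Int.mod x 2 == 0), (1 : Int))).2.1, ((PySem.List.enumerate xs 1).foldl pvStepB ([], (0 : Int), some (PySem.Int.mod x 2 == 0), (1 : Int))).2.2.2)]
          else ((PySem.List.enumerate xs 1).foldl pvStepB ([], (0 : Int), some (PySem.Int.mod x 2 == 0), (1 : Int))).1)
        = flushB ((PySem.List.enumerate xs 1).foldl pvStepB ([], (0 : Int), some (PySem.Int.mod x 2 == 0), (1 : Int))) from rfl]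
    rw [hfold]
    conv_lhs => rw [goR]
    rw [ite_cons]
    push_cast
    rw [show (1 : Int) + (leadLen (PySem.Int.mod x 2 == 0) xs : Int)
          = (leadLen (PySem.Int.mod x 2 == 0) xs : Int) + 1 from by ring]
    simp
    split_ifs <;> first | rfl | (exfalso; omega)

-- ===== VERDICT (by name: the statement is the Claim_ definition above) =====
theorem find_downstep_sequences_spec : Claim_equal_find_downstep_sequences := by
  intro seq _
  unfold Spec_find_downstep_sequences
  exact main_eq seq
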